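-- pv_equiv track=rewrite | github.com/7biok/VimoVPN_OFFICIAL2 | src/shop_bot/modules/xui_api.py | _select_default_marzban_profile
-- ===== SOURCE A (Python) =====
-- from typing import Any
--
-- def _select_default_marzban_profile(
--     inbounds_by_protocol: dict[str, list[str]],
-- ) -> tuple[dict[str, Any], dict[str, list[str]]]:
--     for preferred in ("vless", "trojan", "vmess", "shadowsocks"):
--         tags = inbounds_by_protocol.get(preferred) or []
--         if tags:
--             return {preferred: {}}, {preferred: tags}
--     for protocol, tags in inbounds_by_protocol.items():
--         if tags:
--             return {protocol: {}}, {protocol: tags}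
--     return {}, {}
-- ===== SOURCE B (Python) =====
-- from typing import Any
--
-- def _select_default_marzban_profile(
--     inbounds_by_protocol: dict[str, list[str]],
-- ) -> tuple[dict[str, Any], dict[str, list[str]]]:
--     # Selection by ranking: one pass over the items keeps the non-empty entry
--     # with the lexicographically smallest (preference rank, position) key.
--     rank = {"vless": 0, "trojan": 1, "vmess": 2, "shadowsocks": 3}
--     best = None  # (key, protocol, tags)
--     for i, (protocol, tags) in enumerate(inbounds_by_protocol.items()):
--         if not tags:
--             continue
--         key = (rank.get(protocol, 4), i)
--         if best is None or key < best[0]: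
--             best = (key, protocol, tags)
--     if best is None:
--         return {}, {}
--     _, protocol, tags = best
--     return {protocol: {}}, {protocol: tags}
-- ===== Notes on version B (the rewrite author's own statement) =====
-- stated objective: alternative
-- what changed: Replaces A's two staged first-match scans (preferred probe, then items fallback) by a single pass over the items that selects the non-empty entry with the minimal (preference rank, position) key, a rank dict supplying the ordering.
import Mathlib
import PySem

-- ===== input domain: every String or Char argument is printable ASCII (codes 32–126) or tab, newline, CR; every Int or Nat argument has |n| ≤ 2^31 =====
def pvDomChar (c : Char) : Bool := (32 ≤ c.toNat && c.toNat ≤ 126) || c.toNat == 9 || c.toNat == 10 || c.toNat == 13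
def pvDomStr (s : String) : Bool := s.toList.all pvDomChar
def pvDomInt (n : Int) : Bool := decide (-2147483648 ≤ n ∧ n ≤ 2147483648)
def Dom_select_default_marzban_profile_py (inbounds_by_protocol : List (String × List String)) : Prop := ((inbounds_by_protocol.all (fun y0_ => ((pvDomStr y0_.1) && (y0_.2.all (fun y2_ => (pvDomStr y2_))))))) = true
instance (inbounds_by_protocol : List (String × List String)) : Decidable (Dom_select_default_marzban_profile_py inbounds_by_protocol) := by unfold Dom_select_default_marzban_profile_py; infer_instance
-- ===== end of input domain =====

-- B replaces A's two staged first-match scans by one pass selecting the non-empty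
-- entry with the minimal (preference rank, position) key; objective: alternative.

-- ===== PORT A =====
-- first loop of A: over the four preferred protocols, tags = d.get(p) or []
def pvPrefLoop (d : PySem.Dict String (List String)) :
    List String → Option ((List (String × List (String × String))) × (List (String × List String)))
  | [] => none
  | p :: ps =>
    let tags := (d.get? p).getD []
    if tags ≠ [] then some ([(p, [])], [(p, tags)]) else pvPrefLoop d ps

-- second loop of A: over the dict's items
def pvItemsLoop :
    List (String × List String) → Option ((List (String × List (String × String))) × (List (String × List String)))
  | [] => none
  | (p, tags) :: rest =>
    if tags ≠ [] then some ([(p, [])], [(p, tags)]) else pvItemsLoop rest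

def select_default_marzban_profile_py (inbounds_by_protocol : List (String × List String)) : (List (String × List (String × String))) × (List (String × List String)) :=
  match pvPrefLoop (PySem.Dict.mk inbounds_by_protocol) ["vless", "trojan", "vmess", "shadowsocks"] with
  | some r => r
  | none =>
    match pvItemsLoop inbounds_by_protocol with
    | some r => r
    | none => ([], [])

-- ===== PORT B =====
-- B's rank dict
def pvRankDict : PySem.Dict String Int :=
  PySem.Dict.mk [("vless", 0), ("trojan", 1), ("vmess", 2), ("shadowsocks", 3)]

-- Python's tuple '<' on the (rank, position) keys
def pvKeyLt (a b : Int × Int) : Bool :=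
  decide (a.1 < b.1) || (a.1 == b.1 && decide (a.2 < b.2))

-- B's single loop: keep the non-empty entry with the smallest key
def pvBestLoop :
    List (Int × String × List String) → Option ((Int × Int) × String × List String) →
      Option ((Int × Int) × String × List String)
  | [], best => best
  | (i, p, tags) :: rest, best =>
    if tags = [] then pvBestLoop rest best
    else
      let key : Int × Int := (pvRankDict.getD p 4, i)
      match best with
      | none => pvBestLoop rest (some (key, p, tags))
      | some b =>
        if pvKeyLt key b.1 then pvBestLoop rest (some (key, p, tags))
        else pvBestLoop rest (some b)

def select_default_marzban_profile_py_alt (inbounds_by_protocol : List (String × List String)) : (List (String × List (String × String))) × (List (String × List String)) :=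
  match pvBestLoop (PySem.List.enumerate inbounds_by_protocol) none with
  | none => ([], [])
  | some (_, p, tags) => ([(p, [])], [(p, tags)])

-- ===== PRECONDITION & SPEC =====
-- Pre_ requires distinct keys: the Python argument is a dict, which cannot carry
-- duplicate keys, so an association list with duplicates represents no Python input.
def Pre_select_default_marzban_profile_py (inbounds_by_protocol : List (String × List String)) : Prop :=
  (inbounds_by_protocol.map Prod.fst).Nodup
instance (inbounds_by_protocol : List (String × List String)) : Decidable (Pre_select_default_marzban_profile_py inbounds_by_protocol) := by unfold Pre_select_default_marzban_profile_py; infer_instance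

def pvWitness_select_default_marzban_profile_py : (List (String × List String)) :=
  [("x", []), ("vmess", ["tag1", "tag2"])]

def Spec_select_default_marzban_profile_py (inbounds_by_protocol : List (String × List String)) (out : (List (String × List (String × String))) × (List (String × List String))) : Prop := out = select_default_marzban_profile_py_alt inbounds_by_protocol
instance (inbounds_by_protocol : List (String × List String)) (out : (List (String × List (String × String))) × (List (String × List String))) : Decidable (Spec_select_default_marzban_profile_py inbounds_by_protocol out) := by unfold Spec_select_default_marzban_profile_py; infer_instance

-- ===== CLAIM (what is proved, stated in full; the proofs are below) =====
def Claim_equal_select_default_marzban_profile_py : Prop := ∀ (inbounds_by_protocol : List (String × List String)), Dom_select_default_marzban_profile_py inbounds_by_protocol → Pre_select_default_marzban_profile_py inbounds_by_protocol → Spec_select_default_marzban_profile_py inbounds_by_protocol (select_default_marzban_profile_py inbounds_by_protocol)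

-- ===== LEMMAS AND PROOFS =====

-- the key of an enumerated entry
def pvK (e : Int × String × List String) : Int × Int := (pvRankDict.getD e.2.1 4, e.1)

-- one merge step of the selection
def pvMerge (b e : Int × String × List String) : Int × String × List String :=
  if pvKeyLt (pvK e) (pvK b) then e else b

theorem pvKeyLt_irrefl (a : Int × Int) : pvKeyLt a a = false := by
  simp [pvKeyLt]

theorem pvKeyLt_trans {a b c : Int × Int} (h1 : pvKeyLt a b = true) (h2 : pvKeyLt b c = true) :
    pvKeyLt a c = true := by
  simp only [pvKeyLt, Bool.or_eq_true, Bool.and_eq_true, decide_eq_true_eq, beq_iff_eq] at *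
  omega

theorem pvKeyLt_neg_trans {a b c : Int × Int} (h1 : pvKeyLt a b = false) (h2 : pvKeyLt b c = false) :
    pvKeyLt a c = false := by
  simp only [pvKeyLt, Bool.or_eq_false_iff, Bool.and_eq_false_iff, decide_eq_false_iff_not,
    beq_eq_false_iff_ne, ne_eq] at *
  omega

-- B's loop with a non-empty accumulator is a foldl of pvMerge over the non-empty entries
theorem pvBestLoop_some (l : List (Int × String × List String)) (b : Int × String × List String) :
    pvBestLoop l (some (pvK b, b.2)) =
      some (pvK ((l.filter (fun e => e.2.2 ≠ [])).foldl pvMerge b),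
            ((l.filter (fun e => e.2.2 ≠ [])).foldl pvMerge b).2) := by
  induction l generalizing b with
  | nil => rfl
  | cons e rest ih =>
    obtain ⟨i, p, tags⟩ := e
    by_cases ht : tags = []
    · simp [pvBestLoop, ht, ih]
    · have hfil : (((i, p, tags) :: rest).filter (fun e => e.2.2 ≠ [])) =
          (i, p, tags) :: rest.filter (fun e => e.2.2 ≠ []) := by simp [ht]
      rw [hfil, List.foldl_cons]
      simp only [pvBestLoop, if_neg ht]
      cases hlt : pvKeyLt (pvK (i, p, tags)) (pvK b) with
      | true =>
        have hm : pvMerge b (i, p, tags) = (i, p, tags) := by simp [pvMerge, hlt]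
        rw [hm]
        simp only [show pvKeyLt ((pvRankDict.getD p 4 : Int), i) (pvK b) = true from hlt, if_true]
        exact ih (i, p, tags)
      | false =>
        have hm : pvMerge b (i, p, tags) = b := by simp [pvMerge, hlt]
        rw [hm]
        simp only [show pvKeyLt ((pvRankDict.getD p 4 : Int), i) (pvK b) = false from hlt,
          Bool.false_eq_true, if_false]
        exact ih b

-- B's loop from the empty accumulator
theorem pvBestLoop_none (l : List (Int × String × List String)) :
    pvBestLoop l none =
      match l.filter (fun e => e.2.2 ≠ []) with
      | [] => none
      | e :: rest => some (pvK (rest.foldl pvMerge e), (rest.foldl pvMerge e).2) := by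
  induction l with
  | nil => rfl
  | cons e rest ih =>
    obtain ⟨i, p, tags⟩ := e
    by_cases ht : tags = []
    · simp [pvBestLoop, ht, ih]
    · have hfil : (((i, p, tags) :: rest).filter (fun e => e.2.2 ≠ [])) =
          (i, p, tags) :: rest.filter (fun e => e.2.2 ≠ []) := by simp [ht]
      rw [hfil]
      simp only [pvBestLoop, if_neg ht]
      exact pvBestLoop_some rest (i, p, tags)

-- the foldl of pvMerge picks a member whose key no listed entry beats
theorem foldl_pvMerge_spec (l : List (Int × String × List String)) (b : Int × String × List String) :
    (l.foldl pvMerge b = b ∨ l.foldl pvMerge b ∈ l) ∧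
    pvKeyLt (pvK b) (pvK (l.foldl pvMerge b)) = false ∧
    (∀ x ∈ l, pvKeyLt (pvK x) (pvK (l.foldl pvMerge b)) = false) := by
  induction l generalizing b with
  | nil => exact ⟨Or.inl rfl, pvKeyLt_irrefl _, by simp⟩
  | cons e rest ih =>
    simp only [List.foldl_cons]
    obtain ⟨hmem, hb, hall⟩ := ih (pvMerge b e)
    have hbe : pvKeyLt (pvK b) (pvK (pvMerge b e)) = false := by
      unfold pvMerge; split_ifs with h
      · cases hb' : pvKeyLt (pvK b) (pvK e)
        · rfl
        · exfalso
          have := pvKeyLt_trans h hb'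
          simp [pvKeyLt_irrefl] at this
      · exact pvKeyLt_irrefl _
    have heb : pvKeyLt (pvK e) (pvK (pvMerge b e)) = false := by
      unfold pvMerge; split_ifs with h
      · exact pvKeyLt_irrefl _
      · exact Bool.eq_false_iff.mpr h
    refine ⟨?_, pvKeyLt_neg_trans hbe hb, ?_⟩
    · rcases hmem with h | h
      · rw [h]
        unfold pvMerge; split_ifs
        · exact Or.inr List.mem_cons_self
        · exact Or.inl rfl
      · exact Or.inr (List.mem_cons_of_mem _ h)
    · intro x hx
      rcases List.mem_cons.mp hx with h | h
      · rw [h]; exact pvKeyLt_neg_trans heb hb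
      · exact hall x h

-- A's items loop returns the first non-empty item
theorem pvItemsLoop_eq_filter (l : List (String × List String)) :
    pvItemsLoop l =
      match l.filter (fun pr => pr.2 ≠ []) with
      | [] => none
      | (p, tags) :: _ => some ([(p, [])], [(p, tags)]) := by
  induction l with
  | nil => rfl
  | cons pr rest ih =>
    obtain ⟨p, tags⟩ := pr
    by_cases ht : tags = []
    · simp [pvItemsLoop, ht, ih]
    · simp [pvItemsLoop, ht]

-- the rank dict as an if-chain
theorem pvRank_spec (p : String) :
    pvRankDict.getD p 4 =
      if p = "vless" then 0 else if p = "trojan" then 1 else if p = "vmess" then 2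
      else if p = "shadowsocks" then 3 else 4 := by
  simp only [pvRankDict, PySem.Dict.getD_eq_get?_getD, PySem.Dict.get?_mk_cons, beq_iff_eq]
  by_cases h1 : p = "vless"
  · simp [h1]
  by_cases h2 : p = "trojan"
  · simp [h2]
  by_cases h3 : p = "vmess"
  · simp [h3]
  by_cases h4 : p = "shadowsocks"
  · simp [h4]
  simp [h1, h2, h3, h4, Ne.symm h1, Ne.symm h2, Ne.symm h3, Ne.symm h4, PySem.Dict.get?]

theorem pvRank_le (p : String) : pvRankDict.getD p 4 ≤ 4 := by
  rw [pvRank_spec]; split_ifs <;> norm_num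

-- A's preferred loop returns none when every preferred protocol has no/empty tags
theorem pvPrefLoop_none (d : PySem.Dict String (List String)) (ps : List String)
    (h : ∀ p ∈ ps, (d.get? p).getD [] = []) : pvPrefLoop d ps = none := by
  induction ps with
  | nil => rfl
  | cons p ps ih =>
    simp only [pvPrefLoop, h p (List.mem_cons_self), ne_eq, not_true_eq_false, if_neg,
      not_false_eq_true]
    exact ih (fun q hq => h q (List.mem_cons_of_mem _ hq))

-- ===== VERDICT helper: main equivalence =====
theorem pv_main (d : List (String × List String))
    (hpre : (d.map Prod.fst).Nodup) :
    select_default_marzban_profile_py d = select_default_marzban_profile_py_alt d := by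
  classical
  set E := PySem.List.enumerate d with hE
  have hEmem : ∀ pr ∈ d, ∃ i : Int, (i, pr) ∈ E := by
    intro pr hpr
    obtain ⟨j, hj, hget⟩ := List.mem_iff_getElem.mp hpr
    exact ⟨(0 : Int) + j, (PySem.List.mem_enumerate_iff _ _ _).mpr ⟨j, hj, by rw [hget]⟩⟩
  have hEsnd : ∀ e ∈ E, e.2 ∈ d := by
    intro e he
    obtain ⟨k, hk, hek⟩ := (PySem.List.mem_enumerate_iff _ _ _).mp he
    subst hek; exact List.getElem_mem hk
  have hnd : (PySem.Dict.mk d).keys.Nodup := hpre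
  have hgetTags : ∀ q : String, ((PySem.Dict.mk d).get? q).getD [] ≠ [] →
      ∃ i : Int, (i, q, ((PySem.Dict.mk d).get? q).getD []) ∈ E := by
    intro q hne
    cases hv : (PySem.Dict.mk d).get? q with
    | none => rw [hv] at hne; simp at hne
    | some v =>
      have hmem : (q, v) ∈ d := PySem.Dict.mem_items_of_get?_eq_some _ hv
      obtain ⟨i, hi⟩ := hEmem _ hmem
      refine ⟨i, ?_⟩
      simp only [Option.getD_some]
      exact hi
  unfold select_default_marzban_profile_py select_default_marzban_profile_py_alt
  rw [pvBestLoop_none]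
  cases hNE : E.filter (fun e => e.2.2 ≠ []) with
  | nil =>
    -- no non-empty entry at all
    have hall : ∀ pr ∈ d, pr.2 = [] := by
      intro pr hpr
      obtain ⟨i, hi⟩ := hEmem pr hpr
      by_contra hne
      have hmemf : (i, pr) ∈ E.filter (fun e => e.2.2 ≠ []) :=
        List.mem_filter.mpr ⟨hi, by simpa using hne⟩
      rw [hNE] at hmemf
      simp at hmemf
    have h1 : pvPrefLoop (PySem.Dict.mk d) ["vless", "trojan", "vmess", "shadowsocks"] = none := by
      apply pvPrefLoop_none
      intro p _
      cases hv : (PySem.Dict.mk d).get? p with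
      | none => rfl
      | some v =>
        have hpv : (p, v) ∈ d := PySem.Dict.mem_items_of_get?_eq_some _ hv
        simpa using hall _ hpv
    have h2 : pvItemsLoop d = none := by
      rw [pvItemsLoop_eq_filter]
      have hf : d.filter (fun pr => pr.2 ≠ []) = [] := by
        rw [List.filter_eq_nil_iff]; intro pr hpr; simpa using hall pr hpr
      rw [hf]
    simp [h1, h2]
  | cons e rest =>
    obtain ⟨ie, pe, te⟩ := e
    set e : Int × String × List String := (ie, pe, te) with he
    set m := rest.foldl pvMerge e with hm
    obtain ⟨hmem0, hbe, hall0⟩ := foldl_pvMerge_spec rest e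
    have hmNE : m ∈ E.filter (fun x => x.2.2 ≠ []) := by
      rw [hNE]
      rcases hmem0 with h | h
      · exact h ▸ List.mem_cons_self
      · exact List.mem_cons_of_mem _ h
    have hmE : m ∈ E := (List.mem_filter.mp hmNE).1
    have hmtags : m.2.2 ≠ [] := by
      have := (List.mem_filter.mp hmNE).2; simpa using this
    have hmin : ∀ x ∈ E.filter (fun x => x.2.2 ≠ []), pvKeyLt (pvK x) (pvK m) = false := by
      intro x hx
      rw [hNE] at hx
      rcases List.mem_cons.mp hx with h | h
      · exact h ▸ hbe
      · exact hall0 x h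
    have hmd : m.2 ∈ d := hEsnd m hmE
    have hget_m : (PySem.Dict.mk d).get? m.2.1 = some m.2.2 :=
      PySem.Dict.get?_of_mem_items _ hmd hnd
    -- no preferred protocol with smaller rank has non-empty tags
    have hearlier : ∀ q : String, pvRankDict.getD q 4 < pvRankDict.getD m.2.1 4 →
        ((PySem.Dict.mk d).get? q).getD [] = [] := by
      intro q hlt
      by_contra hne
      obtain ⟨i, hiE⟩ := hgetTags q hne
      have hfil : (i, q, ((PySem.Dict.mk d).get? q).getD []) ∈ E.filter (fun x => x.2.2 ≠ []) :=
        List.mem_filter.mpr ⟨hiE, by simpa using hne⟩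
      have := hmin _ hfil
      simp only [pvK, pvKeyLt, Bool.or_eq_false_iff, decide_eq_false_iff_not] at this
      exact this.1 hlt
    -- the case split on m's protocol
    by_cases h1 : m.2.1 = "vless"
    · have : ((PySem.Dict.mk d).get? "vless").getD [] = m.2.2 := by
        rw [← h1, hget_m]; rfl
      simp only [pvPrefLoop, this, ne_eq, hmtags, not_false_eq_true, if_true]
      rw [← h1]
    · by_cases h2 : m.2.1 = "trojan"
      · have hr : pvRankDict.getD m.2.1 4 = 1 := by rw [pvRank_spec]; simp [h2]
        have hv : ((PySem.Dict.mk d).get? "vless").getD [] = [] := by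
          apply hearlier; rw [hr]; decide
        have : ((PySem.Dict.mk d).get? "trojan").getD [] = m.2.2 := by
          rw [← h2, hget_m]; rfl
        simp only [pvPrefLoop, hv, this, ne_eq, hmtags, not_false_eq_true, if_true,
          not_true_eq_false, if_false]
        rw [← h2]
      · by_cases h3 : m.2.1 = "vmess"
        · have hr : pvRankDict.getD m.2.1 4 = 2 := by rw [pvRank_spec]; simp [h3]
          have hv : ((PySem.Dict.mk d).get? "vless").getD [] = [] := by
            apply hearlier; rw [hr]; decide
          have ht : ((PySem.Dict.mk d).get? "trojan").getD [] = [] := by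
            apply hearlier; rw [hr]; decide
          have : ((PySem.Dict.mk d).get? "vmess").getD [] = m.2.2 := by
            rw [← h3, hget_m]; rfl
          simp only [pvPrefLoop, hv, ht, this, ne_eq, hmtags, not_false_eq_true, if_true,
            not_true_eq_false, if_false]
          rw [← h3]
        · by_cases h4 : m.2.1 = "shadowsocks"
          · have hr : pvRankDict.getD m.2.1 4 = 3 := by rw [pvRank_spec]; simp [h4]
            have hv : ((PySem.Dict.mk d).get? "vless").getD [] = [] := by
              apply hearlier; rw [hr]; decide
            have ht : ((PySem.Dict.mk d).get? "trojan").getD [] = [] := by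
              apply hearlier; rw [hr]; decide
            have hvm : ((PySem.Dict.mk d).get? "vmess").getD [] = [] := by
              apply hearlier; rw [hr]; decide
            have : ((PySem.Dict.mk d).get? "shadowsocks").getD [] = m.2.2 := by
              rw [← h4, hget_m]; rfl
            simp only [pvPrefLoop, hv, ht, hvm, this, ne_eq, hmtags, not_false_eq_true, if_true,
              not_true_eq_false, if_false]
            rw [← h4]
          · -- rank 4: A falls through to the items loop, whose first hit is m = e
            have hr : pvRankDict.getD m.2.1 4 = 4 := by rw [pvRank_spec]; simp [h1, h2, h3, h4]
            have hpref : pvPrefLoop (PySem.Dict.mk d) ["vless", "trojan", "vmess", "shadowsocks"] = none := by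
              apply pvPrefLoop_none
              intro p hp
              apply hearlier
              rw [hr]
              fin_cases hp <;> decide
            -- m is the head e of the filtered list
            have hpw : (E.filter (fun x => x.2.2 ≠ [])).Pairwise (fun p q => p.1 < q.1) :=
              List.Pairwise.sublist List.filter_sublist (PySem.List.pairwise_lt_enumerate d 0)
            have hme : m = e := by
              rcases hmem0 with h | h
              · exact h
              · exfalso
                have hel : e.1 < m.1 := by
                  rw [hNE] at hpw
                  exact (List.pairwise_cons.mp hpw).1 m h
                have := hmin e (hNE ▸ List.mem_cons_self)
                have hre : pvRankDict.getD e.2.1 4 ≤ 4 := pvRank_le _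
                simp only [pvK, pvKeyLt, hr, Bool.or_eq_false_iff, Bool.and_eq_false_iff,
                  decide_eq_false_iff_not, beq_eq_false_iff_ne, ne_eq] at this
                rcases this with ⟨hlt1, hlt2⟩
                rcases hlt2 with h' | h'
                · omega
                · omega
            have hfd : d.filter (fun pr => pr.2 ≠ []) = (E.filter (fun x => x.2.2 ≠ [])).map Prod.snd := by
              have hmap : d = E.map Prod.snd := (PySem.List.map_snd_enumerate d 0).symm
              conv_lhs => rw [hmap]
              rw [List.filter_map]
              rfl
            have hitems : pvItemsLoop d = some ([(m.2.1, [])], [(m.2.1, m.2.2)]) := by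
              rw [pvItemsLoop_eq_filter, hfd, hNE, hme, he]
              rfl
            simp only [hpref, hitems]
            rfl

-- ===== VERDICT (by name: the statement is the Claim_ definition above) =====
theorem select_default_marzban_profile_py_spec : Claim_equal_select_default_marzban_profile_py := by
  intro d _ hpre
  unfold Spec_select_default_marzban_profile_py
  exact pv_main d hpre
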